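-- pv_equiv track=rewrite | github.com/BenBrooke450/Whiteboard | To Review.py | loop
-- ===== SOURCE A (Python) =====
-- def loop(rings: str):
--
--     list_rings = list([y,x] for x,y in zip(rings[::2],rings[1::2]))
--     dict1 = dict()
--
--     for x in list_rings:
--         if x[0] not in dict1.keys():
--             dict1[x[0]] = x[1]
--         else:
--             dict1[x[0]] = x[1] + dict1.get(x[0])
--     return dict1
-- ===== SOURCE B (Python) =====
-- def loop(rings: str):
--     pairs = list(zip(rings[::2], rings[1::2]))
--     result = {}
--     for _, odd in pairs:
--         if odd not in result:
--             result[odd] = ''.join(e for e, o in reversed(pairs) if o == odd)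
--     return result
-- ===== Notes on version B (the rewrite author's own statement) =====
-- stated objective: alternative
-- what changed: A accumulates each key's string incrementally in one pass by prepending onto the dict entry; B only determines the key set in its loop and computes each key's whole value at first occurrence by one filtered scan of the reversed pair list, joined once.
import Mathlib
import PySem

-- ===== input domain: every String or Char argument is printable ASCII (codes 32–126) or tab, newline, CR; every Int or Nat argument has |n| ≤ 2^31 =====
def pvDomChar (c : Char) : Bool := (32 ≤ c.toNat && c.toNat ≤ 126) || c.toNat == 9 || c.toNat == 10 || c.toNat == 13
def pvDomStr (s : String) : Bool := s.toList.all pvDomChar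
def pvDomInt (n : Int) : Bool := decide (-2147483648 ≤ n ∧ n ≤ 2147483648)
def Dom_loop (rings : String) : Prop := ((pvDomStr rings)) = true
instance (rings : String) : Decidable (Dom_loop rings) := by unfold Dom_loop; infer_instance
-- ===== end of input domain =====

-- B replaces A's one-pass incremental prepend-accumulation by a different decomposition:
-- its loop only fixes the key order, and each key's whole value is computed at its first
-- occurrence by one filtered scan of the reversed pair list; objective: alternative.

-- ===== PORT A =====
def loop (rings : String) : List (String × String) :=
  -- list_rings = list([y,x] for x,y in zip(rings[::2], rings[1::2]));
  -- for x in list_rings: if x[0] not in dict1.keys(): dict1[x[0]] = x[1]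
  --                      else: dict1[x[0]] = x[1] + dict1.get(x[0])
  -- (string values kept as char lists; the returned dict as (key, value) pairs)
  (((((PySem.List.slice? rings.toList none none 2).getD []).zip
      ((PySem.List.slice? rings.toList (some 1) none 2).getD [])).map
       (fun p => (p.2, p.1))).foldl
    (fun d x =>
      if x.1 ∉ d.keys then d.insert x.1 [x.2]
      else d.insert x.1 (x.2 :: d.getD x.1 []))
    (PySem.Dict.empty : PySem.Dict Char (List Char))).items.map
      (fun p => (String.ofList [p.1], String.ofList p.2))

-- ===== PORT B =====
def loop_alt (rings : String) : List (String × String) :=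
  -- pairs = list(zip(rings[::2], rings[1::2]))  (written out at both uses)
  -- for _, odd in pairs: if odd not in result:
  --     result[odd] = ''.join(e for e, o in reversed(pairs) if o == odd)
  (((((PySem.List.slice? rings.toList none none 2).getD []).zip
      ((PySem.List.slice? rings.toList (some 1) none 2).getD []))).foldl
    (fun (res : PySem.Dict Char (List Char)) p =>
      if p.2 ∈ res.keys then res
      else res.insert p.2
        (((((PySem.List.slice? rings.toList none none 2).getD []).zip
            ((PySem.List.slice? rings.toList (some 1) none 2).getD [])).reverse.filter
           (fun q => q.2 == p.2)).map Prod.fst))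
    PySem.Dict.empty).items.map (fun p => (String.ofList [p.1], String.ofList p.2))

-- ===== PRECONDITION & SPEC =====
def Spec_loop (rings : String) (out : List (String × String)) : Prop := out = loop_alt rings
instance (rings : String) (out : List (String × String)) : Decidable (Spec_loop rings out) := by unfold Spec_loop; infer_instance

-- ===== CLAIM (what is proved, stated in full; the proofs are below) =====
def Claim_equal_loop : Prop := ∀ (rings : String), Dom_loop rings → Spec_loop rings (loop rings)

-- ===== LEMMAS AND PROOFS =====

/-- First-occurrence key order of the odd components, skipping keys already seen. -/
def pvFO (seen : List Char) : List (Char × Char) → List Char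
  | [] => []
  | p :: rest => if p.2 ∈ seen then pvFO seen rest else p.2 :: pvFO (p.2 :: seen) rest

/-- Evens of pairs whose odd component is `k`, in reverse pair order (A's accumulated value). -/
def pvVal (l : List (Char × Char)) (k : Char) : List Char :=
  ((l.filter (fun q => q.2 == k)).map Prod.fst).reverse

theorem pvFO_congr (s1 s2 : List Char) (l : List (Char × Char))
    (h : ∀ c, c ∈ s1 ↔ c ∈ s2) : pvFO s1 l = pvFO s2 l := by
  induction l generalizing s1 s2 with
  | nil => rfl
  | cons p rest ih =>
      simp only [pvFO]
      by_cases hp : p.2 ∈ s1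
      · rw [if_pos hp, if_pos ((h p.2).mp hp)]; exact ih s1 s2 h
      · rw [if_neg hp, if_neg (fun hc => hp ((h p.2).mpr hc))]
        exact congrArg _ (ih _ _ (by intro c; simp [h c]))

theorem pvFO_not_mem (seen : List Char) (l : List (Char × Char)) (k : Char)
    (hk : k ∈ pvFO seen l) : k ∉ seen := by
  induction l generalizing seen with
  | nil => simp [pvFO] at hk
  | cons p rest ih =>
      simp only [pvFO] at hk
      by_cases hp : p.2 ∈ seen
      · rw [if_pos hp] at hk; exact ih seen hk
      · rw [if_neg hp] at hk
        rcases List.mem_cons.mp hk with h | h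
        · subst h; exact hp
        · exact fun hmem => ih (p.2 :: seen) h (List.mem_cons_of_mem _ hmem)

theorem pvVal_cons (e o k : Char) (rest : List (Char × Char)) :
    pvVal ((e, o) :: rest) k = pvVal rest k ++ (if o == k then [e] else []) := by
  simp only [pvVal, List.filter_cons]
  by_cases h : o == k <;> simp [h]

/-- A-side invariant: folding A's step over `l` from `d` rewrites every existing value
and appends the fresh keys in first-occurrence order. -/
theorem pvFoldA (l : List (Char × Char)) (d : PySem.Dict Char (List Char))
    (hnd : d.keys.Nodup) :
    ((l.map (fun p => (p.2, p.1))).foldl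
        (fun d x =>
          if x.1 ∉ d.keys then d.insert x.1 [x.2]
          else d.insert x.1 (x.2 :: d.getD x.1 []))
        d).items =
      d.items.map (fun kv => (kv.1, pvVal l kv.1 ++ kv.2)) ++
        (pvFO d.keys l).map (fun k => (k, pvVal l k)) := by
  induction l generalizing d with
  | nil => simp [pvVal, pvFO]
  | cons p rest ih =>
      obtain ⟨e, o⟩ := p
      simp only [List.map_cons, List.foldl_cons, pvFO]
      by_cases hmem : o ∈ d.keys
      · have hc : d.contains o = true := by
          rw [PySem.Dict.contains_eq_decide_mem_keys]; simp [hmem]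
        rw [if_neg (by simp [hmem]), if_pos (by simpa using hmem)]
        have hkeys : (d.insert o (e :: d.getD o [])).keys = d.keys :=
          PySem.Dict.keys_insert_of_contains _ _ hc
        rw [ih _ (by rw [hkeys]; exact hnd), hkeys,
          PySem.Dict.items_insert_of_contains _ _ hc]
        congr 1
        · rw [List.map_map]
          apply List.map_congr_left
          intro kv hkv
          by_cases hk : kv.1 == o
          · have hk' : kv.1 = o := by simpa using hk
            have hval : d.getD o [] = kv.2 := by
              rw [← hk']
              exact PySem.Dict.getD_of_mem_items d (by simpa using hkv) hnd []
            simp [Function.comp, hk', pvVal_cons, hval]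
          · have hk' : ¬ (o == kv.1) := fun h => hk (by simpa using (beq_iff_eq.mp h).symm)
            simp [Function.comp, hk, pvVal_cons, hk']
        · apply List.map_congr_left
          intro k hk
          have hkne : ¬ (o == k) := by
            intro h
            exact pvFO_not_mem _ _ _ hk (beq_iff_eq.mp h ▸ hmem)
          simp [pvVal_cons, hkne]
      · have hc : d.contains o = false := by
          rw [PySem.Dict.contains_eq_decide_mem_keys]; simp [hmem]
        rw [if_pos (by simpa using hmem), if_neg hmem]
        have hkeys : (d.insert o [e]).keys = d.keys ++ [o] :=
          PySem.Dict.keys_insert_of_not_contains _ _ hc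
        have hnd' : (d.insert o [e]).keys.Nodup := by
          rw [hkeys, List.nodup_append]
          refine ⟨hnd, List.nodup_singleton _, ?_⟩
          intro a ha b hb
          rw [List.mem_singleton] at hb
          subst hb
          exact fun h => hmem (h ▸ ha)
        rw [ih _ hnd', PySem.Dict.items_insert_of_not_contains _ _ hc, hkeys]
        rw [List.map_append]
        simp only [List.map_cons, List.map_nil, List.cons_append, List.nil_append,
          List.append_assoc]
        congr 1
        · apply List.map_congr_left
          intro kv hkv
          have hkne : ¬ (o == kv.1) := by
            intro h
            exact hmem (beq_iff_eq.mp h ▸ PySem.Dict.mem_keys_of_mem_items d hkv)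
          simp [pvVal_cons, hkne]
        · rw [pvFO_congr (d.keys ++ [o]) (o :: d.keys) rest (by intro c; simp; tauto)]
          congr 1
          · simp [pvVal_cons]
          · apply List.map_congr_left
            intro k hk
            have hkne : ¬ (o == k) := by
              intro h
              exact pvFO_not_mem _ _ _ hk
                (beq_iff_eq.mp h ▸ List.mem_cons_self)
            simp [pvVal_cons, hkne]

/-- B-side invariant: folding B's step over `l` from `d` appends, for each fresh key in
first-occurrence order, the full-list value computed by the filtered scan. -/
theorem pvFoldB (full : List (Char × Char)) (l : List (Char × Char))
    (d : PySem.Dict Char (List Char)) :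
    (l.foldl
        (fun (res : PySem.Dict Char (List Char)) p =>
          if p.2 ∈ res.keys then res
          else res.insert p.2 ((full.reverse.filter (fun q => q.2 == p.2)).map Prod.fst))
        d).items =
      d.items ++ (pvFO d.keys l).map
        (fun k => (k, (full.reverse.filter (fun q => q.2 == k)).map Prod.fst)) := by
  induction l generalizing d with
  | nil => simp [pvFO]
  | cons p rest ih =>
      simp only [List.foldl_cons, pvFO]
      by_cases hmem : p.2 ∈ d.keys
      · rw [if_pos hmem, if_pos hmem, ih]
      · have hc : d.contains p.2 = false := by
          rw [PySem.Dict.contains_eq_decide_mem_keys]; simp [hmem]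
        rw [if_neg hmem, if_neg hmem, ih, PySem.Dict.items_insert_of_not_contains _ _ hc,
          PySem.Dict.keys_insert_of_not_contains _ _ hc,
          pvFO_congr (d.keys ++ [p.2]) (p.2 :: d.keys) rest (by intro c; simp; tauto)]
        simp

-- ===== VERDICT (by name: the statement is the Claim_ definition above) =====
theorem loop_spec : Claim_equal_loop := by
  intro rings _
  show loop rings = loop_alt rings
  unfold loop loop_alt
  set pr := (((PySem.List.slice? rings.toList none none 2).getD []).zip
      ((PySem.List.slice? rings.toList (some 1) none 2).getD [])) with hpr
  have hA := pvFoldA pr (PySem.Dict.empty : PySem.Dict Char (List Char)) (by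
    simp [PySem.Dict.empty, PySem.Dict.keys])
  have hB := pvFoldB pr pr (PySem.Dict.empty : PySem.Dict Char (List Char))
  simp only [show (PySem.Dict.empty : PySem.Dict Char (List Char)).items = [] from rfl,
    show (PySem.Dict.empty : PySem.Dict Char (List Char)).keys = [] from rfl,
    List.map_nil, List.nil_append] at hA hB
  rw [hA, hB, List.map_map, List.map_map]
  apply List.map_congr_left
  intro k _
  simp [Function.comp, pvVal, List.filter_reverse, List.map_reverse]
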